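-- pv_equiv track=rewrite | github.com/Taimoor-Khan-bt/exscope | exscope/core/chromosome_coverage.py | _merge_positions_to_regions
-- ===== SOURCE A (Python) =====
-- from typing import Optional, Union, Dict, List, Tuple
--
-- def _merge_positions_to_regions(positions: set, max_gap: int = 1000) -> List[Tuple[int, int]]:
--     """Merge covered positions into contiguous regions.
--
--     Args:
--         positions: Set of covered genomic positions
--         max_gap: Maximum gap size to merge (default 1000bp)
--
--     Returns:
--         List of (start, end) tuples representing covered regions
--     """
--     if not positions:
--         return []
--
--     # Sort positions
--     sorted_pos = sorted(positions)
--     regions = []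
--
--     start = sorted_pos[0]
--     prev = sorted_pos[0]
--
--     for pos in sorted_pos[1:]:
--         if pos - prev > max_gap:
--             # Gap too large - start new region
--             regions.append((start, prev + 1))
--             start = pos
--         prev = pos
--
--     # Add final region
--     regions.append((start, prev + 1))
--
--     return regions
-- ===== SOURCE B (Python) =====
-- from typing import List, Tuple
--
-- def _merge_positions_to_regions(positions: set, max_gap: int = 1000) -> List[Tuple[int, int]]:
--     """Merge covered positions into contiguous regions.
--
--     Staged construction: sort once, find the boundary pairs (consecutive
--     positions whose gap exceeds max_gap), then materialise the regions by
--     zipping the list of region starts with the list of region ends.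
--     """
--     s = sorted(positions)
--     if not s:
--         return []
--     breaks = [(a, b) for a, b in zip(s, s[1:]) if b - a > max_gap]
--     starts = [s[0]] + [b for _, b in breaks]
--     ends = [a + 1 for a, _ in breaks] + [s[-1] + 1]
--     return list(zip(starts, ends))
-- ===== Notes on version B (the rewrite author's own statement) =====
-- stated objective: alternative
-- what changed: Replaces A's single accumulating loop (start/prev state, append on large gap, post-loop flush) with a staged construction: filter the zipped consecutive pairs for boundary gaps, build the starts list and the ends list from those boundaries, and zip them into the regions.
import Mathlib
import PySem

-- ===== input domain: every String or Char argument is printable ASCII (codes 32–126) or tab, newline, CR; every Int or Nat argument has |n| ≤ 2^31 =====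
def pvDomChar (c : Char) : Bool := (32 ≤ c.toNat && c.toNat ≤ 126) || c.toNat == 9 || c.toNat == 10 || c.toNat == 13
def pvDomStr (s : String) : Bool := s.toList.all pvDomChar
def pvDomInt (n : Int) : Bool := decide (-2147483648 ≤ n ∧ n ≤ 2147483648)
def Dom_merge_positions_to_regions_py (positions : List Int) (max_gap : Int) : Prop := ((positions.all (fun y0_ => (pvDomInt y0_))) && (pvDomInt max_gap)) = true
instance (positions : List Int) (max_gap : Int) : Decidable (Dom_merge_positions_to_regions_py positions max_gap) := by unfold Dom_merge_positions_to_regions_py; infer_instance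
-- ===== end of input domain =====

-- B replaces A's single accumulating loop (start/prev state with a post-loop flush) by a
-- staged construction: filter the zipped consecutive pairs for boundary gaps, build the
-- starts and ends lists from them, and zip; same cost, different decomposition.

-- ===== PORT A =====
-- loop body of A: state = (regions, start, prev)
def pvStepA (max_gap : Int) (st : List (Int × Int) × Int × Int) (pos : Int) :
    List (Int × Int) × Int × Int :=
  if pos - st.2.2 > max_gap then (st.1 ++ [(st.2.1, st.2.2 + 1)], pos, pos)
  else (st.1, st.2.1, pos)

def merge_positions_to_regions_py (positions : List Int) (max_gap : Int) : List (Int × Int) :=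
  if positions = [] then []
  else
    match PySem.List.sorted positions (fun x => x) false with
    | [] => []   -- unreachable (sorted of a nonempty list is nonempty); guard only
    | x :: rest =>
      let st := rest.foldl (pvStepA max_gap) ([], x, x)
      st.1 ++ [(st.2.1, st.2.2 + 1)]

-- ===== PORT B =====
def merge_positions_to_regions_py_alt (positions : List Int) (max_gap : Int) : List (Int × Int) :=
  let s := PySem.List.sorted positions (fun x => x) false
  if s = [] then []
  else
    -- zip(s, s[1:]) filtered for boundary gaps
    let breaks := (s.zip (PySem.List.slice s (some 1) none)).filter
      (fun ab => decide (ab.2 - ab.1 > max_gap))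
    -- [s[0]] + [b for _, b in breaks]
    let starts := PySem.List.pyGetD s 0 0 :: breaks.map (·.2)
    -- [a + 1 for a, _ in breaks] + [s[-1] + 1]
    let ends := breaks.map (fun ab => ab.1 + 1) ++ [PySem.List.pyGetD s (-1) 0 + 1]
    starts.zip ends

-- ===== PRECONDITION & SPEC =====
def Spec_merge_positions_to_regions_py (positions : List Int) (max_gap : Int) (out : List (Int × Int)) : Prop := out = merge_positions_to_regions_py_alt positions max_gap
instance (positions : List Int) (max_gap : Int) (out : List (Int × Int)) : Decidable (Spec_merge_positions_to_regions_py positions max_gap out) := by unfold Spec_merge_positions_to_regions_py; infer_instance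

-- ===== CLAIM (what is proved, stated in full; the proofs are below) =====
def Claim_equal_merge_positions_to_regions_py : Prop := ∀ (positions : List Int) (max_gap : Int), Dom_merge_positions_to_regions_py positions max_gap → Spec_merge_positions_to_regions_py positions max_gap (merge_positions_to_regions_py positions max_gap)

-- ===== LEMMAS AND PROOFS =====

-- Recursive characterisation of A's loop (start/prev state, flush at the end).
def pvGo (g start prev : Int) : List Int → List (Int × Int)
  | [] => [(start, prev + 1)]
  | p :: l => if p - prev > g then (start, prev + 1) :: pvGo g p p l else pvGo g start p l

theorem pvA_eq_go (g : Int) (l : List Int) :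
    ∀ (R : List (Int × Int)) (start prev : Int),
      (let st := l.foldl (pvStepA g) (R, start, prev)
       st.1 ++ [(st.2.1, st.2.2 + 1)]) = R ++ pvGo g start prev l := by
  induction l with
  | nil => intro R start prev; simp [pvGo]
  | cons p l' ih =>
    intro R start prev
    simp only [List.foldl_cons, pvGo]
    by_cases h : p - prev > g
    · have hA : pvStepA g (R, start, prev) p = (R ++ [(start, prev + 1)], p, p) := by
        simp [pvStepA, h]
      rw [hA, ih]
      simp [h]
    · have hA : pvStepA g (R, start, prev) p = (R, start, p) := by
        simp [pvStepA, h]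
      rw [hA, ih]
      simp [h]

-- boundary pairs of the run prev :: t
def pvBreaks (g prev : Int) (t : List Int) : List (Int × Int) :=
  ((prev :: t).zip t).filter (fun ab => decide (ab.2 - ab.1 > g))

-- B's staged zip construction equals the recursive characterisation.
theorem pvGo_eq_zip (g : Int) (t : List Int) :
    ∀ (start prev : Int),
      pvGo g start prev t =
        (start :: (pvBreaks g prev t).map (·.2)).zip
          ((pvBreaks g prev t).map (fun ab => ab.1 + 1) ++ [(prev :: t).getLast (by simp) + 1]) := by
  induction t with
  | nil => intro start prev; simp [pvGo, pvBreaks]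
  | cons y t' ih =>
    intro start prev
    have hlast : (prev :: y :: t').getLast (by simp) = (y :: t').getLast (by simp) := by
      simp [List.getLast_cons]
    by_cases h : y - prev > g
    · have hb : pvBreaks g prev (y :: t') = (prev, y) :: pvBreaks g y t' := by
        simp [pvBreaks, h]
      simp only [pvGo, if_pos h, hb, hlast, List.map_cons, List.cons_append, List.zip_cons_cons]
      rw [ih y y]
    · have hb : pvBreaks g prev (y :: t') = pvBreaks g y t' := by
        simp [pvBreaks, h]
      simp only [pvGo, if_neg h, hb, hlast]
      exact ih start y

theorem merge_positions_to_regions_py_spec : Claim_equal_merge_positions_to_regions_py := by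
  intro positions max_gap _
  unfold Spec_merge_positions_to_regions_py
  unfold merge_positions_to_regions_py merge_positions_to_regions_py_alt
  by_cases hp : positions = []
  · subst hp; simp [PySem.List.sorted]
  · have hne : PySem.List.sorted positions (fun x => x) false ≠ [] := by
      simpa [PySem.List.sorted_eq_nil_iff] using hp
    simp only [hp, ite_false]
    cases hs : PySem.List.sorted positions (fun x => x) false with
    | nil => exact absurd hs hne
    | cons x rest =>
      simp only [ite_false, List.cons_ne_nil,
        PySem.List.slice_from_one, List.tail_cons,
        PySem.List.pyGetD_zero_cons]
      have := pvA_eq_go max_gap rest [] x x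
      simp only [List.nil_append] at this
      rw [this, pvGo_eq_zip max_gap rest x x]
      simp [pvBreaks, PySem.List.pyGetD_neg_one]

-- ===== VERDICT (by name: the statement is the Claim_ definition above) =====
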